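-- pv_equiv track=rewrite | github.com/LaurensDiels/Behavioural-cloning-of-River-Raid-agents | CompareModels.py | create_plot_split
-- ===== SOURCE A (Python) =====
-- import math
-- from typing import Dict, Tuple, List
--
-- def create_plot_split(agent_names: List[str], base_agent_name: str, max_in_single_plot: int,
--                       place_base_agent_in_middle: bool) \
--         -> List[List[str]]:
--     """Splits the agent_names into balanced lists of length max_in_single_plot all of which contain base_agent_name.
--     If place_base_agent_in_middle is set to True, base_agent_name will be the first entry in all these balanced lists.
--     Otherwise we will it near the middle if there is an odd number of agents in a plot, or just left of the middle
--     otherwise.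
--     E.g. with agent_names=['Base', 'BC1', 'BC2', 'BC3'], base_agent_name='Base', max_in_single_plot=3, and
--     place_base_agent_in_middle=False, the output
--     will be [['Base', 'BC1', 'BC2'], ['Base', 'BC3']]. If place_base_agent_in_middle would be set to True the first
--     list would change to ['BC1', 'Base', 'BC2'], but the second would remain the same.
--
--     If base_agent_name or max_in_single_plot is None, the plot will not be split. In this case the output is a list
--     with as single element agent_names. The same output will be returned if there are at most two agents in agent_names.
--     """
--
--     if len(agent_names) <= 2 or base_agent_name is None or max_in_single_plot is None:
--         return [agent_names]
--
--     """
--     Let n be the number of non-base agents, and M be the maximum number of agents in a single plot. If we use k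
--     plots, then the base agent will appear k times in total, giving k + n agents in total. Since we use k plots,
--     at most ceil((k + n)/k) agents (assuming a somewhat equal distribution) will on average appear in each plot.
--     This must be bounded by M,  yielding k >= n/(M-1). Since we want to use as few plots as possible,
--     k = ceil(n/(M-1)).
--
--     If we want to distribute the agents as evenly as possible, we can do that by using either f = floor((k + n)/k)
--     or c = ceil((k + n)/k) agents in a plot. If we would consistently use f, we would only use kf of the k + n
--     agents, meaning we ignored (0 <=) k(1 - f) + n (< k) of them. We can simply add them one by one to the plots.
--     """
--     nb_non_base_agents = len(agent_names) - 1  # n; data includes the base agent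
--     nb_plots = math.ceil(nb_non_base_agents / (max_in_single_plot - 1))  # nb_plots = k, max_in_single_plot = m
--     min_in_plot = 1 + math.floor(nb_non_base_agents / nb_plots)
--     missed = nb_plots * (1 - min_in_plot) + nb_non_base_agents
--
--     plot_split = []
--     base_agent_min_location = (min_in_plot - 1) // 2 if place_base_agent_in_middle else 0
--     # If min_in_plot is even [e.g. 4] and the current (first) plot_list will contain one more entry [5] than the
--     # minimum because we cannot perfectly balance the plots, then the location of the base agent will shift one to the
--     # right [to 2 instead of 1].
--     base_agent_location = base_agent_min_location + 1 if place_base_agent_in_middle and missed >= 1 \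
--                                                          and min_in_plot % 2 == 0 \
--         else base_agent_min_location
--     plot_list = [] if base_agent_location != 0 else [base_agent_name]
--
--     for i in range(len(agent_names)):
--         agent_name = agent_names[i]
--         if agent_name == base_agent_name:
--             continue
--
--         plot_list.append(agent_name)
--         if base_agent_location == len(plot_list):
--             plot_list.append(base_agent_name)  # so that plot_list[base_agent_location] == base_agent_name
--
--         plot_list_is_not_full = len(plot_list) < min_in_plot or (len(plot_list) == min_in_plot and missed >= 1)
--         if not plot_list_is_not_full:
--             if len(plot_list) > min_in_plot:
--                 missed -= 1
--                 base_agent_location = base_agent_min_location + 1 if place_base_agent_in_middle and missed >= 1 \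
--                                                                      and min_in_plot % 2 == 0 \
--                     else base_agent_min_location
--             plot_split.append(plot_list)
--             plot_list = [] if base_agent_location != 0 else [base_agent_name]
--     if len(plot_list) > 1:  # if it does not just contain the base agent
--         plot_split.append(plot_list)
--
--     return plot_split
-- ===== SOURCE B (Python) =====
-- import math
--
--
-- def create_plot_split(agent_names, base_agent_name, max_in_single_plot,
--                       place_base_agent_in_middle):
--     if len(agent_names) <= 2 or base_agent_name is None or max_in_single_plot is None:
--         return [agent_names]
--
--     n = len(agent_names) - 1                       # planned number of non-base agents
--     k = math.ceil(n / (max_in_single_plot - 1))    # number of plots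
--     m = 1 + n // k                                 # minimal plot size (incl. base agent)
--     oversized = n - k * (m - 1)                    # the first `oversized` plots get one extra agent
--     mid = (m - 1) // 2
--
--     non_base = [a for a in agent_names if a != base_agent_name]
--     plots = []
--     pos = 0
--     i = 0
--     while pos < len(non_base):
--         take = m if i < oversized else m - 1       # non-base agents in plot i
--         if place_base_agent_in_middle:
--             loc = mid + 1 if i < oversized and m % 2 == 0 else mid
--         else:
--             loc = 0
--         chunk = non_base[pos:pos + take]
--         if loc <= len(chunk):
--             chunk.insert(loc, base_agent_name)
--         if len(chunk) > 1:
--             plots.append(chunk)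
--         pos += take
--         i += 1
--     return plots
-- ===== Notes on version B (the rewrite author's own statement) =====
-- stated objective: alternative
-- what changed: Replaces A's stateful element-by-element loop (mutable plot list, in-flight base insertion, missed counter and fullness test per agent) by closed-form arithmetic: plot sizes (first n mod k plots oversized) and the base-agent insert index are computed up front and the filtered non-base agents are consumed one slice per plot with a single insert.
-- outside the precondition, e.g. on create_plot_split(['', '', 'x'], '', 0, True): A returns [['x']], B does not finish within the time limit
import Mathlib
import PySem

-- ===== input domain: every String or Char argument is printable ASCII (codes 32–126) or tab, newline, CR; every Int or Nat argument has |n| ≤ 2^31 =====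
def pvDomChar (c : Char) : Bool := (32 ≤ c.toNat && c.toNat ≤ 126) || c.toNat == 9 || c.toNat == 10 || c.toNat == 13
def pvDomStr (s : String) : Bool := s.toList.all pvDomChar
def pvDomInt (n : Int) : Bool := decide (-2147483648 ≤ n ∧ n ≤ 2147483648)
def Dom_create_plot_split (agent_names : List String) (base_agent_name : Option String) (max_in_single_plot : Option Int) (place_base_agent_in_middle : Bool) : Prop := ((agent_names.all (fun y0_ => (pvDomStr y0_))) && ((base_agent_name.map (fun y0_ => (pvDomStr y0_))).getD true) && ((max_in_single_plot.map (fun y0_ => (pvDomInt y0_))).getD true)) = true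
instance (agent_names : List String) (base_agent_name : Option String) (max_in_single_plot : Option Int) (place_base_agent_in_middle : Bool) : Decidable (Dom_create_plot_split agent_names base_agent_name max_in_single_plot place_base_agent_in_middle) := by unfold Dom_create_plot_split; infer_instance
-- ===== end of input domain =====

-- B replaces A's stateful one-agent-at-a-time loop by up-front arithmetic for plot sizes and
-- base-agent positions plus per-plot slicing of the filtered agent list (objective: alternative).

-- ===== PORT A =====
-- the body of A's `for i in range(len(agent_names))` loop, on state (plot_split, plot_list, missed, base_agent_location)
def aStep (b : String) (pmid : Bool) (minp baseMin : Int)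
    (st : List (List String) × List String × Int × Int) (agent_name : String) :
    List (List String) × List String × Int × Int :=
  if agent_name = b then st
  else
    let pl := st.2.1 ++ [agent_name]
    let pl := if st.2.2.2 = (pl.length : Int) then pl ++ [b] else pl
    if ¬ ((pl.length : Int) < minp ∨ ((pl.length : Int) = minp ∧ 1 ≤ st.2.2.1)) then
      if (pl.length : Int) > minp then
        let missed := st.2.2.1 - 1
        let loc := if pmid = true ∧ 1 ≤ missed ∧ PySem.Int.mod minp 2 = 0 then baseMin + 1 else baseMin
        (st.1 ++ [pl], if loc ≠ 0 then [] else [b], missed, loc)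
      else
        (st.1 ++ [pl], if st.2.2.2 ≠ 0 then [] else [b], st.2.2.1, st.2.2.2)
    else (st.1, pl, st.2.2.1, st.2.2.2)

def create_plot_split (agent_names : List String) (base_agent_name : Option String) (max_in_single_plot : Option Int) (place_base_agent_in_middle : Bool) : List (List String) :=
  if (agent_names.length : Int) ≤ 2 ∨ base_agent_name = none ∨ max_in_single_plot = none then
    [agent_names]
  else
    -- past the guard both options are present; the getD defaults are never used
    let b := base_agent_name.getD ""
    let M := max_in_single_plot.getD 0
    let n : Int := (agent_names.length : Int) - 1
    -- math.ceil(n / (M - 1)) as integer ceiling division (float division is exact at these magnitudes)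
    let k : Int := -(PySem.Int.floordiv (-n) (M - 1))
    let minp : Int := 1 + PySem.Int.floordiv n k
    let missed0 : Int := k * (1 - minp) + n
    let baseMin : Int := if place_base_agent_in_middle = true then PySem.Int.floordiv (minp - 1) 2 else 0
    let loc0 : Int := if place_base_agent_in_middle = true ∧ 1 ≤ missed0 ∧ PySem.Int.mod minp 2 = 0 then baseMin + 1 else baseMin
    let st := agent_names.foldl (aStep b place_base_agent_in_middle minp baseMin)
      ([], (if loc0 ≠ 0 then [] else [b]), missed0, loc0)
    if (st.2.1.length : Int) > 1 then st.1 ++ [st.2.1] else st.1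

-- ===== PORT B =====
-- Source B's while loop: one recursive call per plot; `rest` is non_base[pos:], `i` the plot index;
-- fuel = initial length of non_base (the loop consumes ≥ 1 agent per iteration on the admitted inputs)
def bChunks (b : String) (m oversized midIdx : Int) (pmid : Bool) :
    Nat → Int → List String → List (List String)
  | 0, _, _ => []
  | fuel + 1, i, rest =>
    if rest.isEmpty then []
    else
      let take : Int := if i < oversized then m else m - 1
      let loc : Int := if pmid = true then
          (if i < oversized ∧ PySem.Int.mod m 2 = 0 then midIdx + 1 else midIdx) else 0
      let chunk := rest.take take.toNat   -- non_base[pos:pos+take]; 0 ≤ take on the admitted inputs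
      let chunk := if loc ≤ (chunk.length : Int) then PySem.List.insert chunk loc b else chunk
      (if (chunk.length : Int) > 1 then [chunk] else []) ++
        bChunks b m oversized midIdx pmid fuel (i + 1) (rest.drop take.toNat)

def create_plot_split_alt (agent_names : List String) (base_agent_name : Option String) (max_in_single_plot : Option Int) (place_base_agent_in_middle : Bool) : List (List String) :=
  if (agent_names.length : Int) ≤ 2 ∨ base_agent_name = none ∨ max_in_single_plot = none then
    [agent_names]
  else
    -- past the guard both options are present; the getD defaults are never used
    let b := base_agent_name.getD ""
    let M := max_in_single_plot.getD 0
    let n : Int := (agent_names.length : Int) - 1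
    let k : Int := -(PySem.Int.floordiv (-n) (M - 1))
    let m : Int := 1 + PySem.Int.floordiv n k
    let oversized : Int := n - k * (m - 1)
    let midIdx : Int := PySem.Int.floordiv (m - 1) 2
    let non_base := agent_names.filter (fun a => a ≠ b)
    bChunks b m oversized midIdx place_base_agent_in_middle non_base.length 0 non_base

-- ===== PRECONDITION & SPEC =====
-- Pre_ restricts the splitting branch to the function's natural domain max_in_single_plot ≥ 2
-- (each plot holds the base agent plus at least one other): for max_in_single_plot ≤ 1 A raises
-- ZeroDivisionError on most inputs but returns accidental values on some (e.g. max = 0), where B's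
-- while loop does not terminate.
def Pre_create_plot_split (agent_names : List String) (base_agent_name : Option String) (max_in_single_plot : Option Int) (place_base_agent_in_middle : Bool) : Prop :=
  (agent_names.length : Int) ≤ 2 ∨ base_agent_name = none ∨ max_in_single_plot = none ∨
    2 ≤ max_in_single_plot.getD 0
instance (agent_names : List String) (base_agent_name : Option String) (max_in_single_plot : Option Int) (place_base_agent_in_middle : Bool) : Decidable (Pre_create_plot_split agent_names base_agent_name max_in_single_plot place_base_agent_in_middle) := by unfold Pre_create_plot_split; infer_instance

def pvWitness_create_plot_split : List String × Option String × Option Int × Bool :=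
  (["Base", "BC1", "BC2", "BC3"], some "Base", some 3, false)

def Spec_create_plot_split (agent_names : List String) (base_agent_name : Option String) (max_in_single_plot : Option Int) (place_base_agent_in_middle : Bool) (out : List (List String)) : Prop := out = create_plot_split_alt agent_names base_agent_name max_in_single_plot place_base_agent_in_middle
instance (agent_names : List String) (base_agent_name : Option String) (max_in_single_plot : Option Int) (place_base_agent_in_middle : Bool) (out : List (List String)) : Decidable (Spec_create_plot_split agent_names base_agent_name max_in_single_plot place_base_agent_in_middle out) := by unfold Spec_create_plot_split; infer_instance

-- ===== CLAIM (what is proved, stated in full; the proofs are below) =====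
def Claim_equal_create_plot_split : Prop := ∀ (agent_names : List String) (base_agent_name : Option String) (max_in_single_plot : Option Int) (place_base_agent_in_middle : Bool), Dom_create_plot_split agent_names base_agent_name max_in_single_plot place_base_agent_in_middle → Pre_create_plot_split agent_names base_agent_name max_in_single_plot place_base_agent_in_middle → Spec_create_plot_split agent_names base_agent_name max_in_single_plot place_base_agent_in_middle (create_plot_split agent_names base_agent_name max_in_single_plot place_base_agent_in_middle)

-- ===== LEMMAS AND PROOFS =====

-- the plot list A has built after inserting the non-base agents `ys` with base location `loc`
def Plt (b : String) (loc : Int) (ys : List String) : List String :=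
  if loc = 0 then b :: ys
  else if loc ≤ (ys.length : Int) then ys.take loc.toNat ++ b :: ys.drop loc.toNat
  else ys

lemma Plt_length (b : String) (loc : Int) (hloc : 0 ≤ loc) (ys : List String) :
    ((Plt b loc ys).length : Int) = ys.length + (if loc ≤ (ys.length : Int) then 1 else 0) := by
  simp only [Plt]
  split_ifs with h1 h2 h3 <;> simp_all <;> try omega

lemma Plt_insert (b : String) (loc : Int) (hloc : 0 ≤ loc) (ys : List String) :
    (if loc ≤ (ys.length : Int) then PySem.List.insert ys loc b else ys) = Plt b loc ys := by
  simp only [Plt]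
  by_cases h1 : loc ≤ (ys.length : Int)
  · have hcast : loc = ((loc.toNat : Nat) : Int) := by omega
    have hle : loc.toNat ≤ ys.length := by omega
    rw [if_pos h1, if_pos h1, hcast, PySem.List.insert_natCast ys loc.toNat b hle]
    by_cases h0 : loc = 0
    · subst h0; simp
    · rw [if_neg (by omega : ¬ ((loc.toNat : Int) = 0))]
      rw [Int.toNat_natCast]
  · have h0 : ¬ (loc = 0) := by omega
    rw [if_neg h1, if_neg h0, if_neg h1]

lemma Plt_step (b x : String) (loc : Int) (hloc : 0 ≤ loc) (ys : List String) :
    (let t := Plt b loc ys ++ [x];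
     if loc = (t.length : Int) then t ++ [b] else t) = Plt b loc (ys ++ [x]) := by
  simp only [Plt]
  by_cases h0 : loc = 0
  · subst h0; simp; omega
  · by_cases h1 : loc ≤ (ys.length : Int)
    · have h1' : loc ≤ ((ys ++ [x]).length : Int) := by simp; omega
      rw [if_neg h0, if_pos h1, if_neg h0, if_pos h1']
      have hle : loc.toNat ≤ ys.length := by omega
      rw [List.take_append_of_le_length hle, List.drop_append_of_le_length hle]
      rw [if_neg (by simp; omega : ¬ (loc = (((ys.take loc.toNat ++ b :: ys.drop loc.toNat) ++ [x]).length : Int)))]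
      simp
    · by_cases h2 : loc = (ys.length : Int) + 1
      · have h2' : loc ≤ ((ys ++ [x]).length : Int) := by simp; omega
        rw [if_neg h0, if_neg h1, if_neg h0, if_pos h2']
        rw [if_pos (by simp; omega : loc = (((ys ++ [x]).length : Int)))]
        have ht : (ys ++ [x]).take loc.toNat = ys ++ [x] := List.take_of_length_le (by simp; omega)
        have hd : (ys ++ [x]).drop loc.toNat = [] := List.drop_eq_nil_of_le (by simp; omega)
        rw [ht, hd]
      · have h2' : ¬ (loc ≤ ((ys ++ [x]).length : Int)) := by simp; omega
        rw [if_neg h0, if_neg h1, if_neg h0, if_neg h2']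
        rw [if_neg (by simp; omega : ¬ (loc = (((ys ++ [x]).length : Int))))]

lemma Plt_nil (b : String) (loc : Int) (hloc : 0 ≤ loc) :
    (if loc ≠ 0 then ([] : List String) else [b]) = Plt b loc [] := by
  simp only [Plt]
  by_cases h : loc = 0
  · simp [h]
  · rw [if_pos h, if_neg h, if_neg (by simp; omega : ¬ (loc ≤ (([] : List String).length : Int)))]

lemma bChunks_nil (b : String) (m oversized midIdx : Int) (pmid : Bool) (fuel : Nat) (i : Int) :
    bChunks b m oversized midIdx pmid fuel i [] = [] := by
  cases fuel <;> simp [bChunks]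

-- one full (or final partial) plot: A's fold from a fresh plot state consumes min(c, |xs|)
-- agents, where c is the number of non-base agents this plot holds
lemma inner (b : String) (pmid : Bool) (m bm μ loc c : Int)
    (hm : 2 ≤ m) (hμ : 0 ≤ μ)
    (hc : c = if 1 ≤ μ then m else m - 1)
    (hloc0 : 0 ≤ loc) (hlocc : loc ≤ c) :
    ∀ (xs ys : List String) (ps : List (List String)),
      (∀ x ∈ xs, x ≠ b) → (ys.length : Int) < c →
      List.foldl (aStep b pmid m bm) (ps, Plt b loc ys, μ, loc) xs =
        (if ((ys.length : Int) + xs.length < c) then (ps, Plt b loc (ys ++ xs), μ, loc)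
         else
           List.foldl (aStep b pmid m bm)
             (ps ++ [Plt b loc (ys ++ xs.take (c - ys.length).toNat)],
              (if (if 1 ≤ μ then (if pmid = true ∧ 1 ≤ μ - 1 ∧ PySem.Int.mod m 2 = 0 then bm + 1 else bm) else loc) ≠ 0 then []
               else [b]),
              (if 1 ≤ μ then μ - 1 else μ),
              (if 1 ≤ μ then (if pmid = true ∧ 1 ≤ μ - 1 ∧ PySem.Int.mod m 2 = 0 then bm + 1 else bm) else loc))
             (xs.drop (c - ys.length).toNat)) := by
  intro xs
  induction xs with
  | nil =>
    intro ys ps _ hys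
    rw [if_pos (by simpa using hys)]
    simp
  | cons x xs ih =>
    intro ys ps hne hys
    have hxb : x ≠ b := hne x (by simp)
    have hstep : aStep b pmid m bm (ps, Plt b loc ys, μ, loc) x =
        (if (ys.length : Int) + 1 < c then ((ps, Plt b loc (ys ++ [x]), μ, loc) : List (List String) × List String × Int × Int)
         else
           (ps ++ [Plt b loc (ys ++ [x])],
            (if (if 1 ≤ μ then (if pmid = true ∧ 1 ≤ μ - 1 ∧ PySem.Int.mod m 2 = 0 then bm + 1 else bm) else loc) ≠ 0 then []
             else [b]),
            (if 1 ≤ μ then μ - 1 else μ),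
            (if 1 ≤ μ then (if pmid = true ∧ 1 ≤ μ - 1 ∧ PySem.Int.mod m 2 = 0 then bm + 1 else bm) else loc))) := by
      have hpl2 : (if loc = (((Plt b loc ys ++ [x]).length : Nat) : Int) then (Plt b loc ys ++ [x]) ++ [b] else (Plt b loc ys ++ [x])) = Plt b loc (ys ++ [x]) := by
        simpa using Plt_step b x loc hloc0 ys
      have hlen2 : ((Plt b loc (ys ++ [x])).length : Int) =
          ((ys.length : Int) + 1) + (if loc ≤ (ys.length : Int) + 1 then 1 else 0) := by
        rw [Plt_length b loc hloc0 (ys ++ [x])]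
        simp only [List.length_append, List.length_cons, List.length_nil]
        push_cast
        split_ifs with h1 h2 h3 <;> omega
      simp only [aStep, if_neg hxb]
      rw [hpl2]
      by_cases hcase : (ys.length : Int) + 1 < c
      · -- plot not yet full: keep accumulating
        have hNF : ((Plt b loc (ys ++ [x])).length : Int) < m ∨
            (((Plt b loc (ys ++ [x])).length : Int) = m ∧ 1 ≤ μ) := by
          by_cases hμ1 : 1 ≤ μ <;> rw [hc] at hcase <;> simp [hμ1] at hcase <;>
            rcases (by split_ifs at hlen2 <;> omega :
              ((Plt b loc (ys ++ [x])).length : Int) ≤ (ys.length : Int) + 2) with h <;> omega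
        rw [if_neg (not_not_intro hNF), if_pos hcase]
      · -- plot completed with this agent
        have heq : (ys.length : Int) + 1 = c := by omega
        have hins : loc ≤ (ys.length : Int) + 1 := by omega
        have hlen2' : ((Plt b loc (ys ++ [x])).length : Int) = c + 1 := by
          rw [hlen2, if_pos hins]; omega
        rw [if_neg hcase]
        by_cases hμ1 : 1 ≤ μ
        · have hcm : c = m := by rw [hc, if_pos hμ1]
          have hF : ¬ (((Plt b loc (ys ++ [x])).length : Int) < m ∨
              (((Plt b loc (ys ++ [x])).length : Int) = m ∧ 1 ≤ μ)) := by omega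
          rw [if_pos hF, if_pos (by omega : ((Plt b loc (ys ++ [x])).length : Int) > m)]
          simp [hμ1]
        · have hcm : c = m - 1 := by rw [hc, if_neg hμ1]
          have hF : ¬ (((Plt b loc (ys ++ [x])).length : Int) < m ∨
              (((Plt b loc (ys ++ [x])).length : Int) = m ∧ 1 ≤ μ)) := by omega
          rw [if_pos hF, if_neg (by omega : ¬ (((Plt b loc (ys ++ [x])).length : Int) > m))]
          simp [hμ1]
    rw [List.foldl_cons, hstep]
    by_cases hcase : (ys.length : Int) + 1 < c
    · rw [if_pos hcase, ih (ys ++ [x]) ps (fun y hy => hne y (by simp [hy])) (by simp; omega)]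
      have ht : (c - (ys.length : Int)).toNat = (c - ((ys ++ [x]).length : Int)).toNat + 1 := by
        simp; omega
      by_cases hfit : (((ys ++ [x]).length : Int)) + (xs.length : Int) < c
      · rw [if_pos hfit, if_pos (by simp at hfit ⊢; omega :
          ((ys.length : Int)) + ((x :: xs).length : Int) < c)]
        simp
      · rw [if_neg hfit, if_neg (by simp at hfit ⊢; omega :
          ¬ (((ys.length : Int)) + ((x :: xs).length : Int) < c))]
        rw [ht, List.take_succ_cons, List.drop_succ_cons]
        simp
    · have heq : (ys.length : Int) + 1 = c := by omega
      rw [if_neg (by simp; omega : ¬ (((ys.length : Int)) + ((x :: xs).length : Int) < c))]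
      have ht : (c - (ys.length : Int)).toNat = 1 := by omega
      rw [ht, List.take_succ_cons, List.drop_succ_cons]
      simp
      rw [if_neg hcase]

-- A's loop state across completed plots: missed counter and base location before plot i
def aMu (r0 i : Int) : Int := if i < r0 then r0 - i else 0
def aLocF (pmid : Bool) (m bm r0 i : Int) : Int :=
  if pmid = true ∧ 1 ≤ aMu r0 i ∧ PySem.Int.mod m 2 = 0 then bm + 1 else bm
def aFin (st : List (List String) × List String × Int × Int) : List (List String) :=
  if (st.2.1.length : Int) > 1 then st.1 ++ [st.2.1] else st.1

lemma locB_eq (pmid : Bool) (m bm midIdx r0 i : Int)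
    (hbm : bm = if pmid = true then midIdx else 0) :
    (if pmid = true then (if i < r0 ∧ PySem.Int.mod m 2 = 0 then midIdx + 1 else midIdx) else 0)
      = aLocF pmid m bm r0 i := by
  unfold aLocF aMu
  by_cases hp : pmid = true <;> by_cases hi : i < r0 <;>
    by_cases hm2 : PySem.Int.mod m 2 = 0 <;>
    simp [hp, hi, hbm] <;> omega

lemma mu_succ (r0 i : Int) :
    (if 1 ≤ aMu r0 i then aMu r0 i - 1 else aMu r0 i) = aMu r0 (i + 1) := by
  unfold aMu; split_ifs <;> omega

lemma loc_succ (pmid : Bool) (m bm r0 i : Int) :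
    (if 1 ≤ aMu r0 i then (if pmid = true ∧ 1 ≤ aMu r0 i - 1 ∧ PySem.Int.mod m 2 = 0 then bm + 1 else bm)
     else aLocF pmid m bm r0 i) = aLocF pmid m bm r0 (i + 1) := by
  unfold aLocF aMu
  by_cases hp : pmid = true <;> by_cases hm2 : PySem.Int.mod m 2 = 0 <;>
    split_ifs <;> simp_all <;> omega

lemma loc_nonneg (pmid : Bool) (m bm midIdx r0 i : Int) (hm : 2 ≤ m)
    (hmid : midIdx = (m - 1) / 2) (hbm : bm = if pmid = true then midIdx else 0) :
    0 ≤ aLocF pmid m bm r0 i := by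
  unfold aLocF
  have hbm0 : 0 ≤ bm := by rw [hbm]; split_ifs <;> omega
  split_ifs <;> omega

lemma loc_le (pmid : Bool) (m bm midIdx r0 i : Int) (hm : 2 ≤ m)
    (hmid : midIdx = (m - 1) / 2) (hbm : bm = if pmid = true then midIdx else 0) :
    aLocF pmid m bm r0 i ≤ (if 1 ≤ aMu r0 i then m else m - 1) := by
  unfold aLocF
  have hbm0 : bm ≤ (m - 1) / 2 ∧ 0 ≤ bm := by rw [hbm]; split_ifs <;> omega
  split_ifs <;> omega

-- the whole of A's loop, one plot at a time, equals B's chunk list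
lemma outer (b : String) (pmid : Bool) (m bm midIdx r0 : Int)
    (hm : 2 ≤ m) (hr : 0 ≤ r0)
    (hmid : midIdx = (m - 1) / 2)
    (hbm : bm = if pmid = true then midIdx else 0) :
    ∀ (fuel : Nat) (xs : List String) (i : Int) (ps : List (List String)),
      xs.length ≤ fuel → (∀ x ∈ xs, x ≠ b) →
      aFin (List.foldl (aStep b pmid m bm)
        (ps, (if aLocF pmid m bm r0 i ≠ 0 then [] else [b]), aMu r0 i, aLocF pmid m bm r0 i) xs)
        = ps ++ bChunks b m r0 midIdx pmid fuel i xs := by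
  intro fuel
  induction fuel with
  | zero =>
    intro xs i ps hlen _
    have hxs : xs = [] := by simpa using hlen
    subst hxs
    rw [bChunks, List.foldl_nil, List.append_nil]
    unfold aFin
    by_cases h : aLocF pmid m bm r0 i ≠ 0 <;> simp [h]
  | succ fuel ih =>
    intro xs i ps hlen hne
    by_cases hxs : xs = []
    · subst hxs
      rw [bChunks_nil, List.foldl_nil, List.append_nil]
      unfold aFin
      by_cases h : aLocF pmid m bm r0 i ≠ 0 <;> simp [h]
    · have hloc0 := loc_nonneg pmid m bm midIdx r0 i hm hmid hbm
      have hlocc := loc_le pmid m bm midIdx r0 i hm hmid hbm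
      have hμ0 : 0 ≤ aMu r0 i := by unfold aMu; split_ifs <;> omega
      have hc : (if i < r0 then m else m - 1) = (if 1 ≤ aMu r0 i then m else m - 1) := by
        unfold aMu; split_ifs <;> omega
      rw [Plt_nil b (aLocF pmid m bm r0 i) hloc0]
      rw [inner b pmid m bm (aMu r0 i) (aLocF pmid m bm r0 i) (if 1 ≤ aMu r0 i then m else m - 1)
            hm hμ0 rfl hloc0 (by rw [← hc] at hlocc ⊢; exact hlocc) xs [] ps hne
            (by simp; split_ifs <;> omega)]
      rw [mu_succ, loc_succ]
      have hcpos : (1 : Int) ≤ (if 1 ≤ aMu r0 i then m else m - 1) := by split_ifs <;> omega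
      rw [bChunks, if_neg (by simpa using hxs : ¬ (xs.isEmpty = true))]
      simp only [List.nil_append, List.length_nil, Int.natCast_zero, Int.sub_zero, Int.zero_add]
      rw [hc, locB_eq pmid m bm midIdx r0 i hbm]
      by_cases hsplit : (xs.length : Int) < (if 1 ≤ aMu r0 i then m else m - 1)
      · rw [if_pos hsplit]
        have htk : xs.take (if 1 ≤ aMu r0 i then m else m - 1).toNat = xs :=
          List.take_of_length_le (by omega)
        have hdp : xs.drop (if 1 ≤ aMu r0 i then m else m - 1).toNat = [] :=
          List.drop_eq_nil_of_le (by omega)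
        rw [htk, hdp, bChunks_nil, Plt_insert b (aLocF pmid m bm r0 i) hloc0 xs]
        unfold aFin
        by_cases hgt : ((Plt b (aLocF pmid m bm r0 i) xs).length : Int) > 1 <;> simp [hgt]
      · rw [if_neg hsplit]
        have hctn : (if 1 ≤ aMu r0 i then m else m - 1).toNat ≤ xs.length := by omega
        have hlentk : ((xs.take (if 1 ≤ aMu r0 i then m else m - 1).toNat).length : Int)
            = (if 1 ≤ aMu r0 i then m else m - 1) := by
          rw [List.length_take]; omega
        rw [ih (xs.drop (if 1 ≤ aMu r0 i then m else m - 1).toNat) (i + 1) _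
              (by rw [List.length_drop]; omega)
              (fun y hy => hne y (List.mem_of_mem_drop hy))]
        rw [Plt_insert b (aLocF pmid m bm r0 i) hloc0 _ ]
        have hgt : ((Plt b (aLocF pmid m bm r0 i)
            (xs.take (if 1 ≤ aMu r0 i then m else m - 1).toNat)).length : Int) > 1 := by
          rw [Plt_length b _ hloc0, hlentk, if_pos (by omega : aLocF pmid m bm r0 i ≤ (if 1 ≤ aMu r0 i then m else m - 1))]
          omega
        rw [if_pos hgt]
        simp

-- A's loop body ignores occurrences of the base agent, so the fold over agent_names
-- equals the fold over the non-base agents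
lemma foldl_skip (b : String) (pmid : Bool) (minp bm : Int) :
    ∀ (l : List String) (st : List (List String) × List String × Int × Int),
      List.foldl (aStep b pmid minp bm) st l
        = List.foldl (aStep b pmid minp bm) st (l.filter (fun a => a ≠ b)) := by
  intro l
  induction l with
  | nil => intro st; rfl
  | cons x xs ih =>
    intro st
    by_cases hx : x = b
    · rw [List.foldl_cons, List.filter_cons, if_neg (by simp [hx])]
      have hskip : aStep b pmid minp bm st x = st := by rw [aStep, if_pos hx]
      rw [hskip, ih]
    · rw [List.foldl_cons, List.filter_cons, if_pos (by simp [hx]), List.foldl_cons, ih]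

theorem create_plot_split_spec : Claim_equal_create_plot_split := by
  intro agent_names base_agent_name max_in_single_plot pmid _ hpre
  unfold Spec_create_plot_split
  by_cases hg : (agent_names.length : Int) ≤ 2 ∨ base_agent_name = none ∨ max_in_single_plot = none
  · rw [create_plot_split, create_plot_split_alt, if_pos hg]
    rw [if_pos hg]
  · push_neg at hg
    obtain ⟨hlen, hb, hM⟩ := hg
    cases base_agent_name with
    | none => exact absurd rfl hb
    | some b =>
    cases max_in_single_plot with
    | none => exact absurd rfl hM
    | some M =>
    have hM2 : 2 ≤ M := by
      rcases hpre with h | h | h | h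
      · omega
      · exact absurd h hb
      · exact absurd h hM
      · simpa using h
    have hg' : ¬ ((agent_names.length : Int) ≤ 2 ∨ (some b : Option String) = none ∨
        (some M : Option Int) = none) := by simp; omega
    rw [create_plot_split, create_plot_split_alt, if_neg hg']
    dsimp only [Option.getD]
    have hdpos : (0 : Int) < M - 1 := by omega
    rw [PySem.Int.floordiv_eq_ediv_of_pos hdpos]
    set n : Int := (agent_names.length : Int) - 1 with hn
    have hn2 : 2 ≤ n := by omega
    set k : Int := -(-n / (M - 1)) with hk
    have hq := Int.ediv_add_emod (-n) (M - 1)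
    have hqr0 := Int.emod_nonneg (-n) (by omega : M - 1 ≠ 0)
    have hqrlt := Int.emod_lt_of_pos (-n) hdpos
    have hdk : (M - 1) * k = -((M - 1) * (-n / (M - 1))) := by rw [hk]; ring
    have hk1 : 1 ≤ k := by
      by_contra h
      push_neg at h
      have hq0 : 0 ≤ -n / (M - 1) := by omega
      have := mul_nonneg (by omega : (0 : Int) ≤ M - 1) hq0
      linarith
    have hkn : k ≤ n := by
      by_contra h
      push_neg at h
      have h1 : (M - 1) * (n + 1) ≤ (M - 1) * k :=
        mul_le_mul_of_nonneg_left (by omega) (by omega)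
      have h2 : (M - 1) * (n + 1) = (M - 1) * n + (M - 1) := by ring
      have h3 : n ≤ (M - 1) * n := le_mul_of_one_le_left (by omega) (by omega)
      linarith
    rw [PySem.Int.floordiv_eq_ediv_of_pos (by omega : (0 : Int) < k)]
    set m : Int := 1 + n / k with hmdef
    have hm1 : 1 ≤ n / k := (Int.le_ediv_iff_mul_le (by omega)).mpr (by omega)
    have hm2 : 2 ≤ m := by omega
    have hkm : k * (n / k) = k * (m - 1) := by rw [hmdef]; ring
    have hr0eq : k * (1 - m) + n = n % k := by
      rw [Int.emod_def, hmdef]; ring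
    have hr00 : 0 ≤ k * (1 - m) + n := by
      rw [hr0eq]; exact Int.emod_nonneg n (by omega)
    rw [PySem.Int.floordiv_eq_ediv_of_pos (by omega : (0 : Int) < 2)]
    set midIdx : Int := (m - 1) / 2 with hmiddef
    set bm : Int := (if pmid = true then midIdx else 0) with hbmdef
    set r0 : Int := k * (1 - m) + n with hr0def
    -- align A's initial state with aMu/aLocF at plot index 0
    have hmu : aMu r0 0 = r0 := by unfold aMu; split_ifs <;> omega
    have hloc0eq : (if pmid = true ∧ 1 ≤ r0 ∧ PySem.Int.mod m 2 = 0 then bm + 1 else bm)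
        = aLocF pmid m bm r0 0 := by
      unfold aLocF; rw [hmu]
    have hfin : ∀ st : List (List String) × List String × Int × Int,
        (if (st.2.1.length : Int) > 1 then st.1 ++ [st.2.1] else st.1) = aFin st :=
      fun _ => rfl
    rw [hfin, hloc0eq]
    rw [foldl_skip b pmid m bm]
    have hne : ∀ x ∈ agent_names.filter (fun a => a ≠ b), x ≠ b := by
      intro x hx
      simpa using (List.mem_filter.mp hx).2
    have H := outer b pmid m bm midIdx r0 hm2 hr00 hmiddef hbmdef
      (agent_names.filter (fun a => a ≠ b)).length (agent_names.filter (fun a => a ≠ b)) 0 []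
      le_rfl hne
    rw [hmu] at H
    rw [H, List.nil_append]
    -- B writes the number of oversized plots as n - k*(m-1); A's missed counter is k*(1-m)+n
    have hov : n - k * (m - 1) = r0 := by rw [hr0def]; ring
    rw [hov, if_neg hg']
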